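-- pv_equiv track=rewrite | github.com/Neil1355/FocusSight-AI | focussight/summary.py | longest_distracted_streak
-- ===== SOURCE A (Python) =====
-- def longest_distracted_streak(rows):
--     longest = 0
--     current = 0
--     for row in rows:
--         if row["state"] == "DISTRACTED":
--             current += 1
--             if current > longest:
--                 longest = current
--         else:
--             current = 0
--     return longest
-- ===== SOURCE B (Python) =====
-- from itertools import groupby
--
-- def longest_distracted_streak(rows):
--     return max((sum(1 for _ in g)
--                 for k, g in groupby(rows, key=lambda r: r["state"])
--                 if k == "DISTRACTED"), default=0)
-- ===== Notes on version B (the rewrite author's own statement) =====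
-- stated objective: idiomatic
-- what changed: Replaces the running-counter/reset single pass with itertools.groupby: collapse consecutive equal states into runs, then take the max length over DISTRACTED runs (default 0).
import Mathlib
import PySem

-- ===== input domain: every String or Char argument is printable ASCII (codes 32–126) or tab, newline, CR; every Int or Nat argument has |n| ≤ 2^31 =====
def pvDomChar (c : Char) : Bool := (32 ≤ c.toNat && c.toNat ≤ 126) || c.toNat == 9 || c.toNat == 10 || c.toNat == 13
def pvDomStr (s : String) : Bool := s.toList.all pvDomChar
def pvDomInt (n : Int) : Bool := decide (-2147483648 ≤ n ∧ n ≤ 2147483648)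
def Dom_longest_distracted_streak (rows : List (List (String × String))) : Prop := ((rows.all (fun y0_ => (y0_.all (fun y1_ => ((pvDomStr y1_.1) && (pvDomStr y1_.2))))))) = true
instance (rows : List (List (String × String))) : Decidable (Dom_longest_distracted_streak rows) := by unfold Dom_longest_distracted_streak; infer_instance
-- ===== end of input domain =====

-- B replaces A's running-counter/reset pass by a groupby-then-max decomposition (idiomatic; same cost).
-- row["state"]: first-match dict lookup; present on every row admitted by Pre_ (it raises KeyError otherwise).
def pvKey (r : List (String × String)) : String := (PySem.Dict.ofList r).getD "state" ""

-- ===== PORT A =====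
-- the for-loop over rows with state (longest, current), head-first
def pvLdsAux (rows : List (List (String × String))) (longest current : Int) : Int :=
  match rows with
  | [] => longest
  | r :: rs =>
    if pvKey r = "DISTRACTED" then
      let current' := current + 1
      let longest' := if current' > longest then current' else longest
      pvLdsAux rs longest' current'
    else
      pvLdsAux rs longest 0

def longest_distracted_streak (rows : List (List (String × String))) : Int :=
  pvLdsAux rows 0 0

-- ===== PORT B =====
-- itertools.groupby(rows, key=r["state"]) collapsed to (key, run length) pairs
def pvGroupBy : List (List (String × String)) → List (String × Int)
  | [] => []
  | r :: rs =>
    match pvGroupBy rs with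
    | [] => [(pvKey r, 1)]
    | (k, n) :: t =>
      if pvKey r = k then (k, n + 1) :: t else (pvKey r, 1) :: (k, n) :: t

-- max(lengths of DISTRACTED runs, default=0)
def longest_distracted_streak_alt (rows : List (List (String × String))) : Int :=
  ((pvGroupBy rows).filterMap
    (fun g => if g.1 = "DISTRACTED" then some g.2 else none)).foldl max 0

-- ===== PRECONDITION & SPEC =====
-- Pre_ excludes exactly the rows missing the "state" key, on which Python A raises KeyError.
def Pre_longest_distracted_streak (rows : List (List (String × String))) : Prop :=
  rows.all (fun r => r.any (fun p => p.1 == "state")) = true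
instance (rows : List (List (String × String))) : Decidable (Pre_longest_distracted_streak rows) := by unfold Pre_longest_distracted_streak; infer_instance
def pvWitness_longest_distracted_streak : (List (List (String × String))) :=
  [[("state", "DISTRACTED")], [("state", "FOCUSED")], [("state", "DISTRACTED")], [("state", "DISTRACTED")]]

def Spec_longest_distracted_streak (rows : List (List (String × String))) (out : Int) : Prop := out = longest_distracted_streak_alt rows
instance (rows : List (List (String × String))) (out : Int) : Decidable (Spec_longest_distracted_streak rows out) := by unfold Spec_longest_distracted_streak; infer_instance

-- ===== CLAIM (what is proved, stated in full; the proofs are below) =====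
def Claim_equal_longest_distracted_streak : Prop := ∀ (rows : List (List (String × String))), Dom_longest_distracted_streak rows → Pre_longest_distracted_streak rows → Spec_longest_distracted_streak rows (longest_distracted_streak rows)

-- ===== LEMMAS AND PROOFS =====

-- length of the leading DISTRACTED run
def pvPrec : List (List (String × String)) → Int
  | [] => 0
  | r :: rs => if pvKey r = "DISTRACTED" then 1 + pvPrec rs else 0

-- max DISTRACTED run length, as a head-first recursion
def pvMrec : List (List (String × String)) → Int
  | [] => 0
  | r :: rs => if pvKey r = "DISTRACTED" then max (1 + pvPrec rs) (pvMrec rs) else pvMrec rs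

-- the filtered fold from longest_distracted_streak_alt, over an arbitrary run list
def pvF (l : List (String × Int)) : Int :=
  (l.filterMap (fun g => if g.1 = "DISTRACTED" then some g.2 else none)).foldl max 0

theorem pvPrec_nonneg (rows : List (List (String × String))) : 0 ≤ pvPrec rows := by
  induction rows with
  | nil => simp [pvPrec]
  | cons r rs ih => simp only [pvPrec]; split <;> omega

theorem pvPrec_le_mrec (rows : List (List (String × String))) :
    pvPrec rows ≤ pvMrec rows ∧ 0 ≤ pvMrec rows := by
  induction rows with
  | nil => simp [pvPrec, pvMrec]
  | cons r rs ih =>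
    have h := pvPrec_nonneg rs
    simp only [pvPrec, pvMrec]; split <;> omega

theorem pv_foldl_max (l : List Int) (a b : Int) :
    List.foldl max (max a b) l = max b (List.foldl max a l) := by
  induction l generalizing a b with
  | nil => simp [max_comm]
  | cons x t ih =>
    simp only [List.foldl]
    rw [show max (max a b) x = max (max a x) b by omega, ih]

theorem pvF_cons_pos (n : Int) (t : List (String × Int)) :
    pvF (("DISTRACTED", n) :: t) = max n (pvF t) := by
  simp [pvF]
  exact pv_foldl_max _ 0 n

theorem pvF_cons_neg (k : String) (hk : k ≠ "DISTRACTED") (n : Int) (t : List (String × Int)) :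
    pvF ((k, n) :: t) = pvF t := by
  simp [pvF, hk]

-- structure of pvGroupBy: head run carries the leading-prefix length
theorem pvGroupBy_char (rows : List (List (String × String))) :
    (pvGroupBy rows = [] → rows = []) ∧
    (∀ k n t, pvGroupBy rows = (k, n) :: t →
      1 ≤ n ∧ pvPrec rows = (if k = "DISTRACTED" then n else 0)) := by
  induction rows with
  | nil => simp [pvGroupBy]
  | cons r rs ih =>
    obtain ⟨ihn, ihc⟩ := ih
    cases hgb : pvGroupBy rs with
    | nil =>
      have hrs : rs = [] := ihn hgb
      subst hrs
      refine ⟨by simp [pvGroupBy], ?_⟩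
      intro k n t h
      simp only [pvGroupBy] at h
      rw [List.cons.injEq, Prod.mk.injEq] at h
      obtain ⟨⟨hk, hn⟩, ht⟩ := h
      subst hk; subst hn
      refine ⟨by omega, ?_⟩
      by_cases hd : pvKey r = "DISTRACTED" <;> simp [pvPrec, hd]
    | cons p t0 =>
      obtain ⟨k0, n0⟩ := p
      obtain ⟨h1, h2⟩ := ihc k0 n0 t0 hgb
      by_cases hk : pvKey r = k0
      · refine ⟨fun h => by simp [pvGroupBy, hgb, hk] at h, ?_⟩
        intro k n t h
        simp only [pvGroupBy, hgb, if_pos hk] at h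
        rw [List.cons.injEq, Prod.mk.injEq] at h
        obtain ⟨⟨hkk, hnn⟩, ht⟩ := h
        subst hkk; subst hnn
        refine ⟨by omega, ?_⟩
        simp only [pvPrec, hk]
        by_cases hd : k0 = "DISTRACTED"
        · simp only [if_pos hd] at h2 ⊢; omega
        · simp only [if_neg hd]
      · refine ⟨fun h => by simp [pvGroupBy, hgb, hk] at h, ?_⟩
        intro k n t h
        simp only [pvGroupBy, hgb, if_neg hk] at h
        rw [List.cons.injEq, Prod.mk.injEq] at h
        obtain ⟨⟨hkk, hnn⟩, ht⟩ := h
        subst hkk; subst hnn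
        refine ⟨by omega, ?_⟩
        simp only [pvPrec]
        by_cases hd : pvKey r = "DISTRACTED"
        · rw [if_pos hd, if_pos hd]
          have hknd : k0 ≠ "DISTRACTED" := fun hc => hk (hd.trans hc.symm)
          rw [if_neg hknd] at h2
          omega
        · rw [if_neg hd, if_neg hd]

theorem pv_alt_eq_mrec (rows : List (List (String × String))) :
    longest_distracted_streak_alt rows = pvMrec rows := by
  have halt : ∀ l, longest_distracted_streak_alt l = pvF (pvGroupBy l) := fun _ => rfl
  rw [halt]
  induction rows with
  | nil => simp [pvGroupBy, pvMrec, pvF]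
  | cons r rs ih =>
    have hchar := pvGroupBy_char rs
    cases hgb : pvGroupBy rs with
    | nil =>
      have hrs : rs = [] := hchar.1 hgb
      subst hrs
      by_cases hd : pvKey r = "DISTRACTED"
      · rw [show pvGroupBy [r] = [(pvKey r, 1)] from rfl, hd, pvF_cons_pos]
        simp only [pvMrec, pvPrec, if_pos hd]
        simp [pvF]
      · rw [show pvGroupBy [r] = [(pvKey r, 1)] from rfl, pvF_cons_neg _ hd]
        simp [pvMrec, hd, pvF]
    | cons p t =>
      obtain ⟨k, n⟩ := p
      obtain ⟨h1, h2⟩ := hchar.2 k n t hgb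
      rw [hgb] at ih
      by_cases hk : pvKey r = k
      · rw [show pvGroupBy (r :: rs) = (k, n + 1) :: t by
          simp only [pvGroupBy, hgb, if_pos hk]]
        by_cases hd : k = "DISTRACTED"
        · subst hd
          rw [pvF_cons_pos] at ih ⊢
          rw [if_pos rfl] at h2
          simp only [pvMrec, if_pos hk, ← ih, h2]
          omega
        · have hrd : pvKey r ≠ "DISTRACTED" := fun hc => hd (hk.symm.trans hc)
          rw [pvF_cons_neg _ hd] at ih ⊢
          simp only [pvMrec, if_neg hrd]
          exact ih
      · rw [show pvGroupBy (r :: rs) = (pvKey r, 1) :: (k, n) :: t by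
          simp only [pvGroupBy, hgb, if_neg hk]]
        by_cases hd : pvKey r = "DISTRACTED"
        · have hknd : k ≠ "DISTRACTED" := fun hc => hk (hd.trans hc.symm)
          rw [hd, pvF_cons_pos, ih]
          rw [if_neg hknd] at h2
          simp only [pvMrec, if_pos hd, h2]
          omega
        · rw [pvF_cons_neg _ hd, ih]
          simp only [pvMrec, if_neg hd]

theorem pv_aux_char (rows : List (List (String × String))) :
    ∀ L C : Int, 0 ≤ C → C ≤ L →
      pvLdsAux rows L C = max L (max (C + pvPrec rows) (pvMrec rows)) := by
  induction rows with
  | nil =>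
    intro L C h0 hCL
    simp only [pvLdsAux, pvPrec, pvMrec]
    omega
  | cons r rs ih =>
    intro L C h0 hCL
    have hp := pvPrec_nonneg rs
    have hm := pvPrec_le_mrec rs
    by_cases hd : pvKey r = "DISTRACTED"
    · simp only [pvLdsAux, if_pos hd, pvPrec, pvMrec]
      rw [show (if C + 1 > L then C + 1 else L) = max L (C + 1) by omega]
      rw [ih (max L (C + 1)) (C + 1) (by omega) (by omega)]
      omega
    · simp only [pvLdsAux, if_neg hd, pvPrec, pvMrec]
      rw [ih L 0 (by omega) (by omega)]
      omega

-- ===== VERDICT (by name: the statement is the Claim_ definition above) =====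
theorem longest_distracted_streak_spec : Claim_equal_longest_distracted_streak := by
  intro rows _ _
  unfold Spec_longest_distracted_streak
  have ha := pv_aux_char rows 0 0 le_rfl le_rfl
  have hp := pvPrec_nonneg rows
  have hm := pvPrec_le_mrec rows
  rw [pv_alt_eq_mrec, longest_distracted_streak, ha]
  omega
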